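-- pv_equiv track=rewrite | github.com/sueszli/vector-database-benchmark | dataset/python-mutated/lazy_import.py | _canonicalize_import_text
-- ===== SOURCE A (Python) =====
-- def _canonicalize_import_text(text):
--     if False:
--         return 10
--     'Take a list of imports, and split it into regularized form.\n\n        This is meant to take regular import text, and convert it to\n        the forms that the rest of the converters prefer.\n        '
--     out = []
--     cur = None
--     continuing = False
--     for line in text.split('\n'):
--         line = line.strip()
--         loc = line.find('#')
--         if loc != -1:
--             line = line[:loc].strip()
--         if not line:
--             continue
--         if cur is not None:
--             if line.endswith(')'):
--                 out.append(cur + ' ' + line[:-1])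
--                 cur = None
--             else:
--                 cur += ' ' + line
--         elif '(' in line and ')' not in line:
--             cur = line.replace('(', '')
--         else:
--             out.append(line.replace('(', '').replace(')', ''))
--     if cur is not None:
--         raise errors.InvalidImportLine(cur, 'Unmatched parenthesis')
--     return out
-- ===== SOURCE B (Python) =====
-- def _clean_line(raw):
--     line = raw.strip()
--     cut = line.find('#')
--     if cut != -1:
--         line = line[:cut].strip()
--     return line
--
--
-- def _canonicalize_import_text(text):
--     cleaned = [line for line in map(_clean_line, text.split('\n')) if line]
--     out = []
--     it = iter(cleaned)
--     for line in it:
--         if '(' in line and ')' not in line: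
--             cur = line.replace('(', '')
--             for nxt in it:
--                 if nxt.endswith(')'):
--                     out.append(cur + ' ' + nxt[:-1])
--                     break
--                 cur += ' ' + nxt
--             else:
--                 raise errors.InvalidImportLine(cur, 'Unmatched parenthesis')
--         else:
--             out.append(line.replace('(', '').replace(')', ''))
--     return out
-- ===== Notes on version B (the rewrite author's own statement) =====
-- stated objective: alternative
-- what changed: Replaced A's single loop with cur/continuing state by a two-pass decomposition: a cleaning pass (strip, cut comments, drop empties) followed by nested iteration where an inner loop consumes each parenthesised continuation group.
import Mathlib
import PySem

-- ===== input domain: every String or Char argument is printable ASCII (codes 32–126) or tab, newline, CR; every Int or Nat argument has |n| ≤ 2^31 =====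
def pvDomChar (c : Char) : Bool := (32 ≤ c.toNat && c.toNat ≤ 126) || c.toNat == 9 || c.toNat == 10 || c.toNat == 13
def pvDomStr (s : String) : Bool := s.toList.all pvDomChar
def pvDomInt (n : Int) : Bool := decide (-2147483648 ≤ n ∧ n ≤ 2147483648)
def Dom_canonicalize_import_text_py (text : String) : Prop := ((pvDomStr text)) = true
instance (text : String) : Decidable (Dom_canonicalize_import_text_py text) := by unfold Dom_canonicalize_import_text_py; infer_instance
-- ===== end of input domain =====

-- B is a different decomposition of the same parse: a cleaning pass followed by nested
-- iteration (inner loop consumes a parenthesised group), replacing A's single loop with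
-- the `cur`/continuation state; same cost, 'alternative' objective.
-- A RAISES (InvalidImportLine) when a '(' group is never closed; Pre_ excludes exactly those inputs.

-- cleaning of one raw line: strip, cut at first '#', re-strip (identical lines in both Pythons)
def pvCleanLine (raw : List Char) : List Char :=
  let line := PySem.Chars.strip raw
  let loc := PySem.Chars.find line ['#']
  if loc ≠ -1 then PySem.Chars.strip (PySem.Chars.slice line none (some loc)) else line

-- ===== PORT A =====
-- the body of A's loop for one non-empty cleaned line (A's three branches, in order)
def pvStepA2 (st : List (List Char) × Option (List Char)) (line : List Char) :
    List (List Char) × Option (List Char) :=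
  match st.2 with
  | some cur =>
      if PySem.Chars.endswith line [')'] then
        (st.1 ++ [cur ++ ' ' :: PySem.Chars.slice line none (some (-1))], none)
      else
        (st.1, some (cur ++ ' ' :: line))
  | none =>
      if PySem.Chars.isIn ['('] line && !(PySem.Chars.isIn [')'] line) then
        (st.1, some (PySem.Chars.replace line ['('] []))
      else
        (st.1 ++ [PySem.Chars.replace (PySem.Chars.replace line ['('] []) [')'] []], none)

def pvStepA (st : List (List Char) × Option (List Char)) (raw : List Char) :
    List (List Char) × Option (List Char) :=
  let line := pvCleanLine raw
  if line = [] then st else pvStepA2 st line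

def canonicalize_import_text_py (text : String) : List String :=
  -- if the final cur is ≠ none Python raises InvalidImportLine (excluded by Pre_)
  (((PySem.Chars.splitOn text.toList ['\n']).foldl pvStepA ([], none)).1).map String.ofList

-- ===== PORT B =====
-- inner `for nxt in it` loop: returns (finished item, remaining lines), none = for/else raise
def pvInnerB (cur : List Char) : List (List Char) → Option (List Char × List (List Char))
  | [] => none
  | nxt :: rest =>
      if PySem.Chars.endswith nxt [')'] then
        some (cur ++ ' ' :: PySem.Chars.slice nxt none (some (-1)), rest)
      else
        pvInnerB (cur ++ ' ' :: nxt) rest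

theorem pvInnerB_rest_lt {cur i r} : ∀ {ls : List (List Char)},
    pvInnerB cur ls = some (i, r) → r.length < ls.length := by
  intro ls
  induction ls generalizing cur with
  | nil => simp [pvInnerB]
  | cons n rest ih =>
      simp only [pvInnerB]
      split
      · rintro h; cases h; simp
      · intro h; exact Nat.lt_succ_of_lt (ih h)

-- outer `for line in it` loop of B
def pvOuterB : List (List Char) → List (List Char)
  | [] => []
  | line :: rest =>
      if PySem.Chars.isIn ['('] line && !(PySem.Chars.isIn [')'] line) then
        match h : pvInnerB (PySem.Chars.replace line ['('] []) rest with
        | some (item, rest') => item :: pvOuterB rest'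
        | none => []  -- Python raises InvalidImportLine here (excluded by Pre_)
      else
        PySem.Chars.replace (PySem.Chars.replace line ['('] []) [')'] [] :: pvOuterB rest
  termination_by ls => ls.length
  decreasing_by
  · exact Nat.lt_succ_of_lt (pvInnerB_rest_lt h)
  · simp

def canonicalize_import_text_py_alt (text : String) : List String :=
  (pvOuterB (((PySem.Chars.splitOn text.toList ['\n']).map pvCleanLine).filter (· ≠ []))).map String.ofList

-- ===== PRECONDITION & SPEC =====
-- Pre_ excludes exactly the inputs with an unclosed '(' group, on which A (and B) raise
-- errors.InvalidImportLine('Unmatched parenthesis') instead of returning.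
def pvOpen (b : Bool) (raw : List Char) : Bool :=
  let line := pvCleanLine raw
  if line = [] then b
  else if b then !PySem.Chars.endswith line [')']
  else PySem.Chars.isIn ['('] line && !(PySem.Chars.isIn [')'] line)

def Pre_canonicalize_import_text_py (text : String) : Prop :=
  (PySem.Chars.splitOn text.toList ['\n']).foldl pvOpen false = false
instance (text : String) : Decidable (Pre_canonicalize_import_text_py text) := by
  unfold Pre_canonicalize_import_text_py; infer_instance

def pvWitness_canonicalize_import_text_py : String :=
  "import os  # comment\nfrom x import (a,\n  b)\n"

def Spec_canonicalize_import_text_py (text : String) (out : List String) : Prop :=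
  out = canonicalize_import_text_py_alt text
instance (text : String) (out : List String) : Decidable (Spec_canonicalize_import_text_py text out) := by
  unfold Spec_canonicalize_import_text_py; infer_instance

-- ===== CLAIM (what is proved, stated in full; the proofs are below) =====
def Claim_equal_canonicalize_import_text_py : Prop :=
  ∀ (text : String), Dom_canonicalize_import_text_py text →
    Pre_canonicalize_import_text_py text →
    Spec_canonicalize_import_text_py text (canonicalize_import_text_py text)

-- ===== LEMMAS AND PROOFS =====

-- A's fold over raw lines = the bare three-branch fold over the cleaned non-empty lines
theorem pvFoldA_eq_clean (ls : List (List Char)) :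
    ∀ st, ls.foldl pvStepA st = ((ls.map pvCleanLine).filter (· ≠ [])).foldl pvStepA2 st := by
  induction ls with
  | nil => intro st; rfl
  | cons r rest ih =>
      intro st
      simp only [List.foldl_cons, List.map_cons, List.filter_cons, pvStepA]
      by_cases h : pvCleanLine r = [] <;> simp [h, ih]

-- likewise for the Pre_ fold
theorem pvFoldOpen_eq_clean (ls : List (List Char)) :
    ∀ b, ls.foldl pvOpen b =
      ((ls.map pvCleanLine).filter (· ≠ [])).foldl
        (fun b line => if b then !PySem.Chars.endswith line [')']
          else PySem.Chars.isIn ['('] line && !(PySem.Chars.isIn [')'] line)) b := by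
  induction ls with
  | nil => intro b; rfl
  | cons r rest ih =>
      intro b
      simp only [List.foldl_cons, List.map_cons, List.filter_cons, pvOpen]
      by_cases h : pvCleanLine r = [] <;> simp [h, ih]

-- unfolding lemmas for one step of A's three-branch machine
theorem pvStepA2_none (out : List (List Char)) (line : List Char) :
    pvStepA2 (out, none) line =
      if PySem.Chars.isIn ['('] line && !(PySem.Chars.isIn [')'] line) then
        (out, some (PySem.Chars.replace line ['('] []))
      else
        (out ++ [PySem.Chars.replace (PySem.Chars.replace line ['('] []) [')'] []], none) := rfl

theorem pvStepA2_some (out : List (List Char)) (cur line : List Char) :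
    pvStepA2 (out, some cur) line =
      if PySem.Chars.endswith line [')'] then
        (out ++ [cur ++ ' ' :: PySem.Chars.slice line none (some (-1))], none)
      else
        (out, some (cur ++ ' ' :: line)) := rfl

-- the Pre_ boolean tracks whether A's `cur` is set
theorem pvStepA2_open (ls : List (List Char)) :
    ∀ out (cur : Option (List Char)),
      (ls.foldl pvStepA2 (out, cur)).2.isSome =
        ls.foldl (fun b line => if b then !PySem.Chars.endswith line [')']
          else PySem.Chars.isIn ['('] line && !(PySem.Chars.isIn [')'] line)) cur.isSome := by
  induction ls with
  | nil => intro out cur; rfl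
  | cons l rest ih =>
      intro out cur
      cases cur with
      | none =>
          rw [List.foldl_cons, List.foldl_cons, pvStepA2_none]
          by_cases h : (PySem.Chars.isIn ['('] l && !(PySem.Chars.isIn [')'] l)) = true
          · rw [if_pos h, ih]; simp [h]
          · rw [if_neg h, ih]
            simp only [Bool.not_eq_true] at h
            simp [h]
      | some c =>
          rw [List.foldl_cons, List.foldl_cons, pvStepA2_some]
          by_cases h : PySem.Chars.endswith l [')'] = true
          · rw [if_pos h, ih]; simp [h]
          · rw [if_neg h, ih]
            simp only [Bool.not_eq_true] at h
            simp [h]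

-- inner correspondence: with `cur` set, A's fold runs B's inner loop
theorem pvInner_corr (ls : List (List Char)) :
    ∀ cur out,
      match pvInnerB cur ls with
      | some (item, rest') => ls.foldl pvStepA2 (out, some cur) = rest'.foldl pvStepA2 (out ++ [item], none)
      | none => (ls.foldl pvStepA2 (out, some cur)).2.isSome = true := by
  induction ls with
  | nil => intro cur out; simp [pvInnerB]
  | cons n rest ih =>
      intro cur out
      simp only [pvInnerB, List.foldl_cons, pvStepA2_some]
      by_cases h : PySem.Chars.endswith n [')'] = true
      · simp [h]
      · simp only [if_neg h]
        exact ih (cur ++ ' ' :: n) out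

-- outer correspondence, under the "ends with cur = None" hypothesis
theorem pvOuter_corr (ls : List (List Char)) :
    ∀ out, (ls.foldl pvStepA2 (out, none)).2 = none →
      (ls.foldl pvStepA2 (out, none)).1 = out ++ pvOuterB ls := by
  induction ls using pvOuterB.induct with
  | case1 => intro out _; simp [pvOuterB]
  | case2 line rest hp item rest' hinner ih =>
      intro out hend
      rw [List.foldl_cons, pvStepA2_none, if_pos hp] at hend ⊢
      have hi := pvInner_corr rest (PySem.Chars.replace line ['('] []) out
      rw [hinner] at hi
      rw [hi] at hend ⊢
      rw [ih (out ++ [item]) hend]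
      rw [pvOuterB]
      rw [if_pos hp]
      split
      · rename_i item2 rest2 h2
        rw [hinner] at h2
        injection h2 with h2
        obtain ⟨rfl, rfl⟩ : item = item2 ∧ rest' = rest2 := by
          constructor <;> [exact congrArg Prod.fst h2; exact congrArg Prod.snd h2]
        simp
      · rename_i h2
        rw [hinner] at h2
        exact absurd h2 (by simp)
  | case3 line rest hp hinner =>
      intro out hend
      rw [List.foldl_cons, pvStepA2_none, if_pos hp] at hend
      have hi := pvInner_corr rest (PySem.Chars.replace line ['('] []) out
      rw [hinner] at hi
      rw [hend] at hi
      simp at hi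
  | case4 line rest hp ih =>
      intro out hend
      rw [List.foldl_cons, pvStepA2_none, if_neg hp] at hend ⊢
      rw [ih _ hend]
      rw [pvOuterB, if_neg hp]
      simp

-- ===== VERDICT (by name: the statement is the Claim_ definition above) =====
theorem canonicalize_import_text_py_spec : Claim_equal_canonicalize_import_text_py := by
  intro text _ hpre
  unfold Spec_canonicalize_import_text_py canonicalize_import_text_py canonicalize_import_text_py_alt
  unfold Pre_canonicalize_import_text_py at hpre
  rw [pvFoldOpen_eq_clean] at hpre
  rw [pvFoldA_eq_clean]
  have hopen := pvStepA2_open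
    (((PySem.Chars.splitOn text.toList ['\n']).map pvCleanLine).filter (· ≠ [])) [] none
  simp only [Option.isSome_none] at hopen
  rw [hpre] at hopen
  have hnone := Option.not_isSome_iff_eq_none.mp (by rw [hopen]; simp)
  rw [pvOuter_corr _ [] hnone]
  simp
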